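-- pv_equiv track=rewrite | github.com/babywyrm/sysadmin | graphql/beta__.py | sanitize_message
-- ===== SOURCE A (Python) =====
-- def sanitize_message(msg: str) -> str:
--     """Remove potentially sensitive information from logs"""
--     sensitive_patterns = ["password", "token", "auth", "key"]
--     for pattern in sensitive_patterns:
--         if pattern in msg.lower():
--             # Redact sensitive values
--             words = msg.split()
--             for i, word in enumerate(words):
--                 if pattern in word.lower() and "=" in word:
--                     key, _ = word.split("=", 1)
--                     words[i] = f"{key}=***"
--             msg = " ".join(words)
--     return msg
-- ===== SOURCE B (Python) =====
-- def sanitize_message(msg: str) -> str: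
--     """Remove potentially sensitive information from logs (single-pass redaction)"""
--     sensitive_patterns = ["password", "token", "auth", "key"]
--     if any(p in msg.lower() for p in sensitive_patterns):
--         return " ".join(
--             f'{w.split("=", 1)[0]}=***'
--             if "=" in w and any(p in w.lower() for p in sensitive_patterns)
--             else w
--             for w in msg.split()
--         )
--     return msg
-- ===== Notes on version B (the rewrite author's own statement) =====
-- stated objective: simpler
-- what changed: A's outer loop over the four sensitive patterns, each iteration re-splitting, re-scanning and re-joining the whole message, is replaced by one guard plus a single split / single per-word redaction pass testing all patterns at once / single join.
import Mathlib
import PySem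

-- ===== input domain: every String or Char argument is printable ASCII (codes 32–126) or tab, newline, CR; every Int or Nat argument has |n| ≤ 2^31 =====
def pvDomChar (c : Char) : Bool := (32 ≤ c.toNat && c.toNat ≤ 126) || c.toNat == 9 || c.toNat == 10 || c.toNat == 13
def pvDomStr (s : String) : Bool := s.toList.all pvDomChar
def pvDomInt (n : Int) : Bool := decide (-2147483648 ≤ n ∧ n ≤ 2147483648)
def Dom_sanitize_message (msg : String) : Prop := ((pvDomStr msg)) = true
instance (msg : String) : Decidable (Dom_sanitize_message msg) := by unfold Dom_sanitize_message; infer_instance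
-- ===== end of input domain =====

-- B replaces A's four split/redact/join passes (one per sensitive pattern) by a single
-- guarded split, one redaction pass over the words testing all patterns at once, and one join.

-- shared transliteration of Python's `word.split("=", 1)[0]` (both Source A and Source B compute it)
def pvKeyOf (w : List Char) : List Char :=
  match PySem.Chars.splitMax? w ['='] 1 with
  | some (k :: _) => k
  | _ => []

def pvPatterns : List (List Char) := ["password".toList, "token".toList, "auth".toList, "key".toList]

-- ===== PORT A =====
-- inner loop body of A: redact one word for one pattern
def pvRedactA (p w : List Char) : List Char :=
  if PySem.Chars.isIn p (PySem.Chars.lower w) && PySem.Chars.isIn ['='] w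
  then pvKeyOf w ++ ['=', '*', '*', '*'] else w

-- one iteration of A's outer loop over the patterns
def pvStepA (msg : List Char) (p : List Char) : List Char :=
  if PySem.Chars.isIn p (PySem.Chars.lower msg)
  then PySem.Chars.join [' '] ((PySem.Chars.split₀ msg).map (pvRedactA p))
  else msg

def sanitize_message (msg : String) : String :=
  String.ofList (pvPatterns.foldl pvStepA msg.toList)

-- ===== PORT B =====
-- Source B's per-word redaction, testing all patterns at once
def pvRedactB (w : List Char) : List Char :=
  if PySem.Chars.isIn ['='] w && pvPatterns.any (fun p => PySem.Chars.isIn p (PySem.Chars.lower w))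
  then pvKeyOf w ++ ['=', '*', '*', '*'] else w

def sanitize_message_alt (msg : String) : String :=
  if pvPatterns.any (fun p => PySem.Chars.isIn p (PySem.Chars.lower msg.toList))
  then String.ofList (PySem.Chars.join [' '] ((PySem.Chars.split₀ msg.toList).map pvRedactB))
  else msg

-- ===== PRECONDITION & SPEC =====
def Spec_sanitize_message (msg : String) (out : String) : Prop := out = sanitize_message_alt msg
instance (msg : String) (out : String) : Decidable (Spec_sanitize_message msg out) := by unfold Spec_sanitize_message; infer_instance

-- ===== CLAIM (what is proved, stated in full; the proofs are below) =====
def Claim_equal_sanitize_message : Prop := ∀ (msg : String), Dom_sanitize_message msg → Spec_sanitize_message msg (sanitize_message msg)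

-- ===== LEMMAS AND PROOFS =====

-- words are nonempty and whitespace-free
def pvGood (ws : List (List Char)) : Prop :=
  ∀ w ∈ ws, w ≠ [] ∧ ∀ c ∈ w, PySem.Chars.isspace c = false

theorem pv_singleton_infix {c : Char} {w : List Char} : [c] <:+: w ↔ c ∈ w := by
  constructor
  · rintro ⟨a, b, h⟩; subst h; simp
  · intro h; obtain ⟨a, b, rfl⟩ := List.append_of_mem h; exact ⟨a, b, by simp⟩

-- a member of a word list is an infix of its join
theorem pv_infix_join {w : List Char} {ws : List (List Char)} (sep : List Char) (h : w ∈ ws) :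
    w <:+: PySem.Chars.join sep ws := by
  induction ws with
  | nil => simp at h
  | cons u t ih =>
    cases t with
    | nil =>
      rw [PySem.Chars.join_singleton]
      simp at h; subst h; exact List.infix_rfl
    | cons v t' =>
      rw [PySem.Chars.join_cons_cons]
      rcases List.mem_cons.1 h with h | h
      · subst h; exact ((List.prefix_append _ _).trans (List.prefix_append _ _)).isInfix
      · exact (ih h).trans (List.suffix_append _ _).isInfix

-- p occurring in (the lowering of) an infix occurs in the whole
theorem pv_isIn_lower_mono {p w s : List Char} (hw : w <:+: s)
    (h : PySem.Chars.isIn p (PySem.Chars.lower w) = true) :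
    PySem.Chars.isIn p (PySem.Chars.lower s) = true := by
  rw [PySem.Chars.isIn_iff_infix] at h ⊢
  exact h.trans (hw.map _)

-- ---- split₀ facts (split₀.go invariants) ----
theorem pv_sgo_infix (s : List Char) : ∀ (cur : List Char) (acc : List (List Char)),
    ∀ w ∈ PySem.Chars.split₀.go s cur acc, w ∈ acc ∨ w <:+: cur.reverse ++ s := by
  induction s with
  | nil =>
    intro cur acc w hw
    rw [PySem.Chars.split₀.go] at hw
    by_cases hc : cur.isEmpty
    · rw [if_pos hc] at hw; left; simpa using hw
    · rw [if_neg hc] at hw; simp at hw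
      rcases hw with h | h
      · left; exact h
      · right; rw [h, List.append_nil]
  | cons c rest ih =>
    intro cur acc w hw
    rw [PySem.Chars.split₀.go] at hw
    have step : ∀ (acc' : List (List Char)), w ∈ acc' ∨ w <:+: rest →
        w ∈ acc' ∨ w <:+: cur.reverse ++ c :: rest := by
      intro acc' h
      rcases h with h | h
      · left; exact h
      · right
        refine h.trans ?_
        exact ((List.suffix_cons c rest).trans (List.suffix_append _ _)).isInfix
    by_cases hs : PySem.Chars.isspace c = true
    · rw [if_pos hs] at hw
      by_cases hc : cur.isEmpty
      · rw [if_pos hc] at hw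
        exact step acc (by simpa using ih [] acc w hw)
      · rw [if_neg hc] at hw
        rcases (by simpa using ih [] (cur.reverse :: acc) w hw :
            w ∈ cur.reverse :: acc ∨ w <:+: rest) with h | h
        · rcases List.mem_cons.1 h with h | h
          · right; rw [h]; exact (List.prefix_append _ _).isInfix
          · left; exact h
        · exact step acc (Or.inr h)
    · rw [if_neg hs] at hw
      rcases ih (c :: cur) acc w hw with h | h
      · left; exact h
      · right; simpa [List.append_assoc] using h

theorem pv_split₀_infix {w s : List Char} (h : w ∈ PySem.Chars.split₀ s) : w <:+: s := by
  have := pv_sgo_infix s [] [] w h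
  simpa using this

theorem pv_sgo_good (s : List Char) : ∀ (cur : List Char) (acc : List (List Char)),
    pvGood acc → (∀ c ∈ cur, PySem.Chars.isspace c = false) →
    pvGood (PySem.Chars.split₀.go s cur acc) := by
  induction s with
  | nil =>
    intro cur acc hacc hcur w hw
    rw [PySem.Chars.split₀.go] at hw
    by_cases hc : cur.isEmpty
    · rw [if_pos hc] at hw; exact hacc w (by simpa using hw)
    · rw [if_neg hc] at hw; simp at hw
      rcases hw with h | h
      · exact hacc w h
      · subst h
        refine ⟨by simpa using (List.isEmpty_eq_false_iff.1 (by simpa using hc)), ?_⟩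
        intro c hcmem; exact hcur c (by simpa using hcmem)
  | cons c rest ih =>
    intro cur acc hacc hcur
    rw [PySem.Chars.split₀.go]
    by_cases hs : PySem.Chars.isspace c = true
    · rw [if_pos hs]
      by_cases hc : cur.isEmpty
      · rw [if_pos hc]; exact ih [] acc hacc (by simp)
      · rw [if_neg hc]
        refine ih [] (cur.reverse :: acc) ?_ (by simp)
        intro w hw
        rcases List.mem_cons.1 hw with h | h
        · subst h
          refine ⟨by simpa using (List.isEmpty_eq_false_iff.1 (by simpa using hc)), ?_⟩
          intro d hd; exact hcur d (by simpa using hd)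
        · exact hacc w h
    · rw [if_neg hs]
      refine ih (c :: cur) acc hacc ?_
      intro d hd
      rcases List.mem_cons.1 hd with h | h
      · subst h; simpa using hs
      · exact hcur d h

theorem pv_split₀_good (s : List Char) : pvGood (PySem.Chars.split₀ s) :=
  pv_sgo_good s [] [] (by intro w hw; simp at hw) (by simp)

theorem pv_go_word (w : List Char) (hw : ∀ c ∈ w, PySem.Chars.isspace c = false) :
    ∀ (s cur : List Char) (acc : List (List Char)),
    PySem.Chars.split₀.go (w ++ s) cur acc = PySem.Chars.split₀.go s (w.reverse ++ cur) acc := by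
  induction w with
  | nil => intro s cur acc; simp
  | cons c rest ih =>
    intro s cur acc
    rw [List.cons_append, PySem.Chars.split₀.go, if_neg (by simpa using hw c (by simp))]
    rw [ih (fun d hd => hw d (by simp [hd])) s (c :: cur) acc]
    simp

theorem pv_sgo_join (ws : List (List Char)) (h : pvGood ws) :
    ∀ (acc : List (List Char)),
    PySem.Chars.split₀.go (PySem.Chars.join [' '] ws) [] acc = acc.reverse ++ ws := by
  induction ws with
  | nil => intro acc; rw [PySem.Chars.join_nil, PySem.Chars.split₀.go]; simp
  | cons w t ih =>
    intro acc
    obtain ⟨hne, hnsp⟩ := h w (by simp)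
    cases t with
    | nil =>
      rw [PySem.Chars.join_singleton, ← List.append_nil w, pv_go_word w hnsp [] [] acc,
        PySem.Chars.split₀.go]
      rw [if_neg (by simpa using hne)]
      simp
    | cons v t' =>
      rw [PySem.Chars.join_cons_cons, List.append_assoc, pv_go_word w hnsp _ [] acc]
      rw [List.singleton_append, PySem.Chars.split₀.go,
        if_pos (by decide : PySem.Chars.isspace ' ' = true),
        if_neg (by simpa using hne)]
      simp only [List.append_nil, List.reverse_reverse]
      rw [ih (fun u hu => h u (by simp [hu])) (w :: acc)]
      simp

theorem pv_split₀_join (ws : List (List Char)) (h : pvGood ws) :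
    PySem.Chars.split₀ (PySem.Chars.join [' '] ws) = ws := by
  have := pv_sgo_join ws h []
  simpa [PySem.Chars.split₀] using this

-- ---- word.split("=", 1) facts (splitOnMax.go at maxsplit 1) ----
theorem pv_go_m0 (fuel : Nat) (l cur : List Char) (acc : List (List Char)) :
    PySem.Chars.splitOnMax.go ['='] fuel 0 l cur acc = ((cur.reverse ++ l) :: acc).reverse := by
  cases fuel with
  | zero => rw [PySem.Chars.splitOnMax.go]
  | succ n => cases l with
    | nil => rw [PySem.Chars.splitOnMax.go]; simp; omega
    | cons c rest => rw [PySem.Chars.splitOnMax.go]; simp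

theorem pv_go_m1 (l : List Char) : ∀ (fuel : Nat) (cur : List Char) (acc : List (List Char)),
    l.length < fuel →
    PySem.Chars.splitOnMax.go ['='] fuel 1 l cur acc =
      if '=' ∈ l
      then acc.reverse ++ [cur.reverse ++ l.takeWhile (· ≠ '='), (l.dropWhile (· ≠ '=')).tail]
      else acc.reverse ++ [cur.reverse ++ l] := by
  induction l with
  | nil =>
    intro fuel cur acc h
    cases fuel with
    | zero => omega
    | succ n => rw [PySem.Chars.splitOnMax.go]; simp; omega
  | cons c rest ih =>
    intro fuel cur acc h
    cases fuel with
    | zero => omega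
    | succ n =>
      rw [PySem.Chars.splitOnMax.go]
      by_cases hc : c = '='
      · subst hc
        simp only [if_neg (by omega : ¬ (1:Nat) = 0)]
        rw [if_pos (by simp [List.isPrefixOf])]
        rw [pv_go_m0]
        simp [List.takeWhile, List.dropWhile]
      · simp only [if_neg (by omega : ¬ (1:Nat) = 0)]
        rw [if_neg (by simp [List.isPrefixOf]; exact Ne.symm hc)]
        rw [ih n (c :: cur) acc (by simpa using Nat.lt_of_succ_lt_succ h)]
        by_cases hm : '=' ∈ rest
        · rw [if_pos hm, if_pos (by simp [hm])]
          simp [hc]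
        · rw [if_neg hm, if_neg (by simp [hm, Ne.symm hc])]
          simp

theorem pv_keyOf_eq {w : List Char} (h : '=' ∈ w) :
    pvKeyOf w = w.takeWhile (· ≠ '=') := by
  have hs : PySem.Chars.splitMax? w ['='] 1 =
      some [w.takeWhile (· ≠ '='), (w.dropWhile (· ≠ '=')).tail] := by
    rw [PySem.Chars.splitMax?]
    rw [if_neg (by simp)]
    rw [PySem.Chars.splitOnMax]
    rw [if_neg (by omega : ¬ (1:Int) < 0)]
    rw [show Int.toNat 1 = 1 from rfl]
    rw [pv_go_m1 w (w.length + 1) [] [] (by omega), if_pos h]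
    simp
  rw [pvKeyOf, hs]

theorem pv_mem_eq_of_isIn {w : List Char} (h : PySem.Chars.isIn ['='] w = true) : '=' ∈ w :=
  pv_singleton_infix.1 ((PySem.Chars.isIn_iff_infix _ _).1 h)

theorem pv_keyOf_no_eq {w : List Char} (h : '=' ∈ w) : ∀ c ∈ pvKeyOf w, c ≠ '=' := by
  rw [pv_keyOf_eq h]
  intro c hc
  simpa using List.mem_takeWhile_imp hc

-- a redacted word is left unchanged by any further redaction
theorem pv_redactA_redacted (q w : List Char) (h : '=' ∈ w) :
    pvRedactA q (pvKeyOf w ++ ['=', '*', '*', '*']) = pvKeyOf w ++ ['=', '*', '*', '*'] := by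
  have htk : (pvKeyOf w).takeWhile (fun x => decide (x ≠ '=')) = pvKeyOf w :=
    List.takeWhile_eq_self_iff.2 (by intro c hc; simpa using pv_keyOf_no_eq h c hc)
  rw [pvRedactA]
  split
  · congr 1
    rw [pv_keyOf_eq (show '=' ∈ pvKeyOf w ++ ['=', '*', '*', '*'] by simp)]
    rw [List.takeWhile_append, htk]
    simp
  · rfl

theorem pv_redactFold_redacted (ps : List (List Char)) (w : List Char) (h : '=' ∈ w) :
    ps.foldl (fun w p => pvRedactA p w) (pvKeyOf w ++ ['=', '*', '*', '*']) =
      pvKeyOf w ++ ['=', '*', '*', '*'] := by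
  induction ps with
  | nil => rfl
  | cons p t ih => rw [List.foldl_cons, pv_redactA_redacted p w h, ih]

-- A's inner loop composed over a pattern list, per word
def pvRedactFold (ps : List (List Char)) (w : List Char) : List Char :=
  ps.foldl (fun w p => pvRedactA p w) w

theorem pv_perWord (ps : List (List Char)) (w : List Char) :
    pvRedactFold ps w =
      if PySem.Chars.isIn ['='] w && ps.any (fun p => PySem.Chars.isIn p (PySem.Chars.lower w))
      then pvKeyOf w ++ ['=', '*', '*', '*'] else w := by
  induction ps with
  | nil => simp [pvRedactFold]
  | cons p t ih =>
    rw [pvRedactFold, List.foldl_cons]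
    by_cases hP : PySem.Chars.isIn p (PySem.Chars.lower w) = true
    · by_cases hE : PySem.Chars.isIn ['='] w = true
      · rw [show pvRedactA p w = pvKeyOf w ++ ['=', '*', '*', '*'] by
          rw [pvRedactA, if_pos (by rw [hP, hE]; rfl)]]
        rw [pv_redactFold_redacted t w (pv_mem_eq_of_isIn hE)]
        rw [if_pos (by rw [hE, List.any_cons, hP]; rfl)]
      · rw [show pvRedactA p w = w by
          rw [pvRedactA, if_neg (by rw [Bool.eq_false_iff.2 hE]; simp)]]
        rw [← pvRedactFold, ih, Bool.eq_false_iff.2 hE]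
        simp
    · rw [show pvRedactA p w = w by
        rw [pvRedactA, if_neg (by rw [Bool.eq_false_iff.2 hP]; simp)]]
      rw [← pvRedactFold, ih, List.any_cons, Bool.eq_false_iff.2 hP]
      simp

theorem pv_redact_good {ws : List (List Char)} (p : List Char) (h : pvGood ws) :
    pvGood (ws.map (pvRedactA p)) := by
  intro w hw
  rw [List.mem_map] at hw
  obtain ⟨u, hu, rfl⟩ := hw
  obtain ⟨hne, hnsp⟩ := h u hu
  rw [pvRedactA]
  split
  · next hcond =>
    have hmem : '=' ∈ u := pv_mem_eq_of_isIn (by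
      rcases Bool.and_eq_true_iff.1 hcond with ⟨_, h2⟩; exact h2)
    refine ⟨by simp, ?_⟩
    intro c hc
    rcases List.mem_append.1 hc with hc | hc
    · rw [pv_keyOf_eq hmem] at hc
      exact hnsp c (List.takeWhile_sublist _ |>.mem hc)
    · fin_cases hc <;> decide
  · exact ⟨hne, hnsp⟩

theorem pv_stepA_join {ws : List (List Char)} (p : List Char) (h : pvGood ws) :
    pvStepA (PySem.Chars.join [' '] ws) p = PySem.Chars.join [' '] (ws.map (pvRedactA p)) := by
  rw [pvStepA]
  by_cases hg : PySem.Chars.isIn p (PySem.Chars.lower (PySem.Chars.join [' '] ws)) = true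
  · rw [if_pos hg, pv_split₀_join ws h]
  · rw [if_neg hg]
    have hmap : ∀ w ∈ ws, pvRedactA p w = w := by
      intro w hw
      rw [pvRedactA, if_neg]
      intro hcond
      rcases Bool.and_eq_true_iff.1 hcond with ⟨h1, _⟩
      exact hg (pv_isIn_lower_mono (pv_infix_join [' '] hw) h1)
    rw [(List.map_congr_left hmap).trans ws.map_id]

theorem pv_foldl_join (ps : List (List Char)) : ∀ {ws : List (List Char)}, pvGood ws →
    ps.foldl pvStepA (PySem.Chars.join [' '] ws) =
      PySem.Chars.join [' '] (ws.map (pvRedactFold ps)) := by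
  induction ps with
  | nil =>
    intro ws _
    rw [(List.map_congr_left (fun w _ => (rfl : pvRedactFold [] w = w))).trans ws.map_id]
    rfl
  | cons p t ih =>
    intro ws h
    rw [List.foldl_cons, pv_stepA_join p h, ih (pv_redact_good p h), List.map_map]
    rfl

-- A characterised: one guard, one split, one per-word fold, one join
theorem pv_A_char (ps : List (List Char)) (msg : List Char) :
    ps.foldl pvStepA msg =
      if ps.any (fun p => PySem.Chars.isIn p (PySem.Chars.lower msg))
      then PySem.Chars.join [' '] ((PySem.Chars.split₀ msg).map (pvRedactFold ps))
      else msg := by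
  induction ps generalizing msg with
  | nil => simp
  | cons p t ih =>
    rw [List.foldl_cons]
    by_cases hp : PySem.Chars.isIn p (PySem.Chars.lower msg) = true
    · rw [show pvStepA msg p =
          PySem.Chars.join [' '] ((PySem.Chars.split₀ msg).map (pvRedactA p)) by
        rw [pvStepA, if_pos hp]]
      rw [pv_foldl_join t (pv_redact_good p (pv_split₀_good msg))]
      rw [if_pos (by rw [List.any_cons, hp]; rfl), List.map_map]
      rfl
    · rw [show pvStepA msg p = msg by rw [pvStepA, if_neg hp]]
      rw [ih, List.any_cons, Bool.eq_false_iff.2 hp, Bool.false_or]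
      by_cases ht : t.any (fun p => PySem.Chars.isIn p (PySem.Chars.lower msg)) = true
      · rw [if_pos ht, if_pos ht]
        congr 1
        apply List.map_congr_left
        intro w hw
        rw [show pvRedactFold (p :: t) w = pvRedactFold t (pvRedactA p w) from rfl,
          show pvRedactA p w = w by
            rw [pvRedactA, if_neg]
            intro hcond
            rcases Bool.and_eq_true_iff.1 hcond with ⟨h1, _⟩
            exact hp (pv_isIn_lower_mono (pv_split₀_infix hw) h1)]
      · rw [if_neg ht, if_neg ht]

theorem pv_redactB_eq (w : List Char) : pvRedactFold pvPatterns w = pvRedactB w := by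
  rw [pv_perWord, pvRedactB]

-- ===== VERDICT (by name: the statement is the Claim_ definition above) =====
theorem sanitize_message_spec : Claim_equal_sanitize_message := by
  intro msg _
  unfold Spec_sanitize_message sanitize_message sanitize_message_alt
  rw [pv_A_char]
  split
  · simp [funext pv_redactB_eq]
  · exact String.ofList_toList
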